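-- pv_equiv track=rewrite | github.com/natcz/pythonCourseUWR | lista8/prus.py | czy_ukladalne
-- ===== SOURCE A (Python) =====
-- def literki(s):
-- 	slowo={}
-- 	pomocniczy=set()
-- 	for i in range(len(s)):
-- 		if s[i] not in pomocniczy:
-- 			slowo[s[i]]=1
-- 			pomocniczy.add(s[i])
-- 		else:
-- 			slowo[s[i]]+=1
-- 	return slowo
--
-- def czy_ukladalne(s1,s2):
-- 	pierwsze=literki(s1)
-- 	drugie=literki(s2)
-- 	zbior1=set(pierwsze)
-- 	zbior2=set(drugie)
-- 	ukladalne=True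
-- 	for i in range(len(s2)):
-- 		if(s2[i] not in zbior1):
-- 			ukladalne=False
-- 			break
-- 		elif(pierwsze[s2[i]]<drugie[s2[i]]):
-- 			ukladalne=False
-- 			break
-- 		else:
-- 			continue
--
-- 	return ukladalne
-- ===== SOURCE B (Python) =====
-- def czy_ukladalne(s1, s2):
--     dostepne = {}
--     for c in s1:
--         dostepne[c] = dostepne.get(c, 0) + 1
--     for c in s2:
--         ile = dostepne.get(c, 0)
--         if ile == 0:
--             return False
--         dostepne[c] = ile - 1
--     return True
-- ===== Notes on version B (the rewrite author's own statement) =====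
-- stated objective: simpler
-- what changed: B keeps one depleting tally built from s1 and decrements it while scanning s2, instead of building two full histograms (each with an auxiliary seen-set) and comparing per-character totals.
import Mathlib
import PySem

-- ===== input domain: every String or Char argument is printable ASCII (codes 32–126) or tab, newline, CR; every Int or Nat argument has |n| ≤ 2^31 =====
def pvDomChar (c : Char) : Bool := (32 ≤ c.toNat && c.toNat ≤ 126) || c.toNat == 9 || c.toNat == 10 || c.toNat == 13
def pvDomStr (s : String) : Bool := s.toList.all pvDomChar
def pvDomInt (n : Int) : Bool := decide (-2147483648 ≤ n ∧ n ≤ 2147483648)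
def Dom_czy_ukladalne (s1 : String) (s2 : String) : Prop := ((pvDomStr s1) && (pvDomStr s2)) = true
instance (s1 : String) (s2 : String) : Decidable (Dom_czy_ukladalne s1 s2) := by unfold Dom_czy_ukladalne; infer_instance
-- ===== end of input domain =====

-- B replaces A's two full histograms (each with an auxiliary seen-set) by one depleting
-- tally of s1 decremented while scanning s2; objective: simpler, same return value.

-- ===== PORT A =====
-- literki's 'for i in range(len(s))' reads exactly s[0], s[1], …, ported as a fold over the chars;
-- state = (slowo, pomocniczy).
def literkiStep (st : PySem.Dict Char Int × PySem.Set Char) (c : Char) :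
    PySem.Dict Char Int × PySem.Set Char :=
  if !(st.2.contains c) then (st.1.insert c 1, st.2.add c)
  else (st.1.modify c 0 (· + 1), st.2)   -- slowo[c] += 1 (key present: guarded by the set)

def literki (s : String) : PySem.Dict Char Int :=
  (s.toList.foldl literkiStep (PySem.Dict.empty, PySem.Set.empty)).1

-- the 'for i in range(len(s2))' loop with its break/flag, as recursion on the chars of s2;
-- pierwsze[c] / drugie[c] are ported as getD _ 0: the preceding membership test (and c ∈ s2
-- for drugie) guarantees the key is present, so Python's d[c] returns exactly this value.
def czyLoopA (zbior1 : PySem.Set Char) (pierwsze drugie : PySem.Dict Char Int) :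
    List Char → Bool
  | [] => true
  | c :: rest =>
    if !(zbior1.contains c) then false
    else if pierwsze.getD c 0 < drugie.getD c 0 then false
    else czyLoopA zbior1 pierwsze drugie rest

def czy_ukladalne (s1 : String) (s2 : String) : Bool :=
  let pierwsze := literki s1
  let drugie := literki s2
  let zbior1 := PySem.Set.ofList pierwsze.keys   -- set(pierwsze) = set of its keys
  let _zbior2 := PySem.Set.ofList drugie.keys    -- computed by A, never used
  czyLoopA zbior1 pierwsze drugie s2.toList

-- ===== PORT B =====
def czyAltLoop (dostepne : PySem.Dict Char Int) : List Char → Bool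
  | [] => true
  | c :: rest =>
    let ile := dostepne.getD c 0
    if ile == 0 then false
    else czyAltLoop (dostepne.insert c (ile - 1)) rest

def czy_ukladalne_alt (s1 : String) (s2 : String) : Bool :=
  czyAltLoop (s1.toList.foldl (fun d c => d.insert c (d.getD c 0 + 1)) PySem.Dict.empty)
    s2.toList

-- ===== PRECONDITION & SPEC =====
def Spec_czy_ukladalne (s1 : String) (s2 : String) (out : Bool) : Prop := out = czy_ukladalne_alt s1 s2
instance (s1 : String) (s2 : String) (out : Bool) : Decidable (Spec_czy_ukladalne s1 s2 out) := by unfold Spec_czy_ukladalne; infer_instance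

-- ===== CLAIM (what is proved, stated in full; the proofs are below) =====
def Claim_equal_czy_ukladalne : Prop := ∀ (s1 : String) (s2 : String), Dom_czy_ukladalne s1 s2 → Spec_czy_ukladalne s1 s2 (czy_ukladalne s1 s2)

-- ===== LEMMAS AND PROOFS =====

-- A's literki loop maintains (counter of the seen prefix, set of the seen prefix).
lemma literki_fold (xs ys : List Char) :
    xs.foldl literkiStep (PySem.Dict.counter ys, PySem.Set.ofList ys) =
      (PySem.Dict.counter (ys ++ xs), PySem.Set.ofList (ys ++ xs)) := by
  induction xs generalizing ys with
  | nil => simp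
  | cons c rest ih =>
    have hstep : literkiStep (PySem.Dict.counter ys, PySem.Set.ofList ys) c =
        (PySem.Dict.counter (ys ++ [c]), PySem.Set.ofList (ys ++ [c])) := by
      have hset : PySem.Set.ofList (ys ++ [c]) = (PySem.Set.ofList ys).add c := by
        simp [PySem.Set.ofList, List.foldl_append]
      by_cases hc : c ∈ ys
      · have hadd : (PySem.Set.ofList ys).add c = PySem.Set.ofList ys := by
          simp [PySem.Set.add, PySem.Set.mem_ofList, hc]
        simp [literkiStep, PySem.Set.mem_ofList, hc,
          PySem.Dict.counter_append_singleton, hset]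
      · have hmod : (PySem.Dict.counter ys).modify c 0 (· + 1) =
            (PySem.Dict.counter ys).insert c 1 := by
          simp [PySem.Dict.modify, PySem.Dict.getD_counter, List.count_eq_zero_of_not_mem hc]
        simp [literkiStep, PySem.Set.mem_ofList, hc,
          PySem.Dict.counter_append_singleton, hmod, hset]
    rw [List.foldl_cons, hstep, ih (ys ++ [c])]
    simp

lemma literki_eq_counter (s : String) : literki s = PySem.Dict.counter s.toList := by
  have h := literki_fold s.toList []
  simpa [literki, PySem.Dict.counter, PySem.Set.ofList] using congrArg Prod.fst h

-- A's break/flag loop is an 'all' over the characters.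
lemma czyLoopA_eq_all (z : PySem.Set Char) (p1 p2 : PySem.Dict Char Int) (l : List Char) :
    czyLoopA z p1 p2 l =
      l.all (fun c => decide (c ∈ z) && !(decide (p1.getD c 0 < p2.getD c 0))) := by
  induction l with
  | nil => rfl
  | cons c rest ih =>
    by_cases hz : c ∈ z
    · by_cases hlt : p1.getD c 0 < p2.getD c 0 <;>
        simp [czyLoopA, hz, hlt, ih]
    · simp [czyLoopA, hz]

-- B's depleting loop succeeds iff every character's demand fits the remaining tally.
lemma czyAltLoop_iff (l : List Char) (d : PySem.Dict Char Int)
    (hd : ∀ c, 0 ≤ d.getD c 0) :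
    czyAltLoop d l = true ↔ ∀ c, (l.count c : Int) ≤ d.getD c 0 := by
  induction l generalizing d with
  | nil => simpa [czyAltLoop] using hd
  | cons c rest ih =>
    by_cases h0 : d.getD c 0 = 0
    · have hfalse : czyAltLoop d (c :: rest) = false := by simp [czyAltLoop, h0]
      rw [hfalse]
      constructor
      · intro h; cases h
      · intro h
        have hc := h c
        rw [h0] at hc
        simp [List.count_cons_self] at hc
        omega
    · have hd' : ∀ c', 0 ≤ (d.insert c (d.getD c 0 - 1)).getD c' 0 := by
        intro c'
        by_cases hc' : c' = c
        · rw [hc', PySem.Dict.getD_insert_self]; have := hd c; omega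
        · rw [PySem.Dict.getD_insert_of_ne _ _ _ hc']; exact hd c'
      have hstep : czyAltLoop d (c :: rest) =
          czyAltLoop (d.insert c (d.getD c 0 - 1)) rest := by
        simp [czyAltLoop, h0]
      have hkey : (∀ c', (rest.count c' : Int) ≤ (d.insert c (d.getD c 0 - 1)).getD c' 0) ↔
          ∀ c', (((c :: rest).count c' : Nat) : Int) ≤ d.getD c' 0 := by
        constructor
        · intro h c'
          by_cases hc' : c' = c
          · have := h c
            rw [PySem.Dict.getD_insert_self] at this
            rw [hc']
            simp [List.count_cons_self]
            omega
          · have := h c'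
            rw [PySem.Dict.getD_insert_of_ne _ _ _ hc'] at this
            rw [List.count_cons_of_ne (Ne.symm hc')]
            exact this
        · intro h c'
          by_cases hc' : c' = c
          · have := h c
            rw [List.count_cons_self] at this
            rw [hc', PySem.Dict.getD_insert_self]
            push_cast at this ⊢
            omega
          · have := h c'
            rw [List.count_cons_of_ne (Ne.symm hc')] at this
            rw [PySem.Dict.getD_insert_of_ne _ _ _ hc']
            exact this
      rw [hstep, ih _ hd', hkey]

-- ===== VERDICT (by name: the statement is the Claim_ definition above) =====
theorem czy_ukladalne_spec : Claim_equal_czy_ukladalne := by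
  intro s1 s2 _
  unfold Spec_czy_ukladalne
  have hA : czy_ukladalne s1 s2 =
      s2.toList.all (fun c => decide (c ∈ s1.toList) &&
        !(decide ((s1.toList.count c : Int) < (s2.toList.count c : Int)))) := by
    rw [czy_ukladalne]
    simp only [literki_eq_counter, czyLoopA_eq_all]
    refine List.all_congr rfl (fun c => ?_)
    simp [PySem.Set.mem_ofList, PySem.Dict.keys_counter, PySem.Dict.getD_counter]
  have hB : (czy_ukladalne_alt s1 s2 = true) ↔
      ∀ c, (s2.toList.count c : Int) ≤ (s1.toList.count c : Int) := by
    rw [czy_ukladalne_alt, PySem.Dict.foldl_insert_getD_add_one_eq_counter]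
    rw [czyAltLoop_iff _ _ (by intro c; rw [PySem.Dict.getD_counter]; positivity)]
    constructor <;> intro h c <;> have hc := h c <;>
      rw [PySem.Dict.getD_counter] at * <;> exact hc
  rw [Bool.eq_iff_iff, hA, hB, List.all_eq_true]
  constructor
  · intro h c
    by_cases hc : c ∈ s2.toList
    · have := h c hc
      simp at this
      omega
    · rw [List.count_eq_zero_of_not_mem hc]
      positivity
  · intro h c hc
    have hle := h c
    have h2 : 1 ≤ s2.toList.count c := List.one_le_count_iff.mpr hc
    have h1 : c ∈ s1.toList := by
      rw [← List.one_le_count_iff]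
      omega
    simp [h1]
    omega
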